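-- pv_equiv track=rewrite | github.com/petrasvestartas/compas_wood | src/rhino/plugin/commands/w_element_group.py | infer_group_hierarchy
-- ===== SOURCE A (Python) =====
-- def infer_group_hierarchy(group_dict):
--     inferred_parents = {}
--     groups = list(group_dict.keys())
--     for group in groups:
--         inferred_parents[group] = None
--         objs = group_dict[group]['objects']
--         candidates = []
--         for other in groups:
--             if other == group:
--                 continue
--             other_objs = group_dict[other]['objects']
--             if objs.issubset(other_objs) and objs != other_objs:
--                 diff = len(other_objs) - len(objs)
--                 candidates.append((other, diff))
--         if candidates:
--             parent = min(candidates, key=lambda x: x[1])[0]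
--             inferred_parents[group] = parent
--     return inferred_parents
-- ===== SOURCE B (Python) =====
-- def infer_group_hierarchy(group_dict):
--     groups = list(group_dict.keys())
--     # stable sort by object-set size; ties keep original key order
--     order = sorted(groups, key=lambda g: len(group_dict[g]['objects']))
--     result = {}
--     for g in groups:
--         objs = group_dict[g]['objects']
--         parent = None
--         for other in order:
--             if objs < group_dict[other]['objects']:
--                 parent = other
--                 break
--         result[g] = parent
--     return result
-- ===== Notes on version B (the rewrite author's own statement) =====
-- stated objective: alternative
-- what changed: B sorts the group names once by object-set size (stable sort) and assigns each group the first proper superset found in that order with an early break, instead of A's per-group candidate list plus min(key=size difference).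
import Mathlib
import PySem

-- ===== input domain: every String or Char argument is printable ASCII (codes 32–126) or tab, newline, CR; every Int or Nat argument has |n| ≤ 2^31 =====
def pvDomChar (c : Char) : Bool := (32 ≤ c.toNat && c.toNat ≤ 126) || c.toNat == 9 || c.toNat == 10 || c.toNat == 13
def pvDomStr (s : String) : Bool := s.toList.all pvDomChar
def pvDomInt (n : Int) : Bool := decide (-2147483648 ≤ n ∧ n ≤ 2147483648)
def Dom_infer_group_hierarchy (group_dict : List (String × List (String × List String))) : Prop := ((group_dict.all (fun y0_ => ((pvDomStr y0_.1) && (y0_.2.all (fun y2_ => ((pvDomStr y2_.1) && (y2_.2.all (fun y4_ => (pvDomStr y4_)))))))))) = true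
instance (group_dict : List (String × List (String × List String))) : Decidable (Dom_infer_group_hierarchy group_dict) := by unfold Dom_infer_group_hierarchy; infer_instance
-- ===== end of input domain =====

-- B replaces A's per-group candidate collection + min() by one stable sort of the groups by
-- object-set size and a first-hit scan per group (objective: alternative decomposition).


-- ===== PORT A =====
-- shared input indexing: group_dict[g]['objects'] (both dict lookups; Pre_ guarantees the key 'objects' exists, so the [] defaults are never used)
def pvObjs (d : PySem.Dict String (List (String × List String))) (g : String) : List String :=
  (PySem.Dict.ofList (PySem.Dict.getD d g [])).getD "objects" []

-- len(s) for a Python set represented as the list of its elements (robust to duplicate list entries)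
def pvSetLen (l : List String) : Nat := (PySem.Set.ofList l).length

-- a.issubset(b)
def pvSub (a b : List String) : Bool := a.all (fun x => b.contains x)

-- a == b for Python sets
def pvSetEq (a b : List String) : Bool := pvSub a b && pvSub b a

def infer_group_hierarchy (group_dict : List (String × List (String × List String))) : List (String × Option String) :=
  let d := PySem.Dict.ofList group_dict
  let groups := d.keys
  (groups.foldl (fun inferred_parents group =>
      let inferred_parents := inferred_parents.insert group none
      let objs := pvObjs d group
      let candidates : List (String × Int) := groups.foldl (fun candidates other =>
          if other == group then candidates
          else
            let other_objs := pvObjs d other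
            if pvSub objs other_objs && !(pvSetEq objs other_objs) then
              candidates ++ [(other, (pvSetLen other_objs : Int) - (pvSetLen objs : Int))]
            else candidates) []
      -- 'if candidates: parent = min(candidates, key=lambda x: x[1])[0]'; min? is none exactly when candidates == []
      match PySem.List.min? candidates (fun x => x.2) with
      | none => inferred_parents
      | some m => inferred_parents.insert group (some m.1)) PySem.Dict.empty).items

-- ===== PORT B =====
-- objs < oo  (proper subset of Python sets)
def pvProperSub (a b : List String) : Bool := pvSub a b && !(pvSub b a)

def infer_group_hierarchy_alt (group_dict : List (String × List (String × List String))) : List (String × Option String) :=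
  let d := PySem.Dict.ofList group_dict
  let groups := d.keys
  let order := PySem.List.sorted groups (fun g => pvSetLen (pvObjs d g)) false
  (groups.foldl (fun result g =>
      let objs := pvObjs d g
      -- 'parent = None; for other in order: if objs < ...: parent = other; break'
      result.insert g (order.find? (fun other => pvProperSub objs (pvObjs d other)))) PySem.Dict.empty).items

-- ===== PRECONDITION & SPEC =====
-- Pre_ excludes exactly the inputs where A raises KeyError: some group's inner dict has no 'objects' key.
def Pre_infer_group_hierarchy (group_dict : List (String × List (String × List String))) : Prop :=
  ∀ p ∈ (PySem.Dict.ofList group_dict).items, "objects" ∈ p.2.map (fun q => q.1)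
instance (group_dict : List (String × List (String × List String))) : Decidable (Pre_infer_group_hierarchy group_dict) := by unfold Pre_infer_group_hierarchy; infer_instance

def pvWitness_infer_group_hierarchy : (List (String × List (String × List String))) :=
  [("a", [("objects", ["x"])]), ("b", [("objects", ["x", "y"])])]

def Spec_infer_group_hierarchy (group_dict : List (String × List (String × List String))) (out : List (String × Option String)) : Prop := out = infer_group_hierarchy_alt group_dict
instance (group_dict : List (String × List (String × List String))) (out : List (String × Option String)) : Decidable (Spec_infer_group_hierarchy group_dict out) := by unfold Spec_infer_group_hierarchy; infer_instance

-- ===== CLAIM (what is proved, stated in full; the proofs are below) =====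
def Claim_equal_infer_group_hierarchy : Prop := ∀ (group_dict : List (String × List (String × List String))), Dom_infer_group_hierarchy group_dict → Pre_infer_group_hierarchy group_dict → Spec_infer_group_hierarchy group_dict (infer_group_hierarchy group_dict)

-- ===== LEMMAS AND PROOFS =====

theorem pvSub_self (a : List String) : pvSub a a = true := by
  simp [pvSub, List.all_eq_true]

theorem pvProperSub_self (a : List String) : pvProperSub a a = false := by
  simp [pvProperSub, pvSub_self]

-- A's candidate test (with the 'other == group' skip) equals B's proper-subset test
theorem pred_eq (d : PySem.Dict String (List (String × List String))) (g o : String) :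
    (!(o == g) && (pvSub (pvObjs d g) (pvObjs d o) && !(pvSetEq (pvObjs d g) (pvObjs d o))))
      = pvProperSub (pvObjs d g) (pvObjs d o) := by
  by_cases h : o = g
  · subst h; simp [pvProperSub_self]
  · have hb : (o == g) = false := beq_eq_false_iff_ne.mpr h
    simp only [hb, Bool.not_false, Bool.true_and, pvSetEq, pvProperSub]
    cases pvSub (pvObjs d g) (pvObjs d o) <;> cases pvSub (pvObjs d o) (pvObjs d g) <;> rfl

theorem min?_map {α β κ : Type} [LT κ] [DecidableLT κ] (f : α → β) (key : β → κ) (l : List α) :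
    PySem.List.min? (l.map f) key = (PySem.List.min? l (fun x => key (f x))).map f := by
  show List.foldl _ (Option.map f none) _ = _
  simp only [PySem.List.min?]
  generalize (none : Option α) = acc
  induction l generalizing acc with
  | nil => rfl
  | cons x xs ih =>
    simp only [List.map_cons, List.foldl_cons]
    cases acc with
    | none => simpa using ih (some x)
    | some m =>
      simp only [Option.map_some]
      by_cases hc : key (f x) < key (f m)
      · rw [if_pos hc, if_pos hc]; simpa using ih (some x)
      · rw [if_neg hc, if_neg hc]; simpa using ih (some m)

theorem min?_congr {α κ₁ κ₂ : Type} [LT κ₁] [DecidableLT κ₁] [LT κ₂] [DecidableLT κ₂]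
    (k₁ : α → κ₁) (k₂ : α → κ₂) (h : ∀ x y, k₁ x < k₁ y ↔ k₂ x < k₂ y) (l : List α) :
    PySem.List.min? l k₁ = PySem.List.min? l k₂ := by
  simp only [PySem.List.min?]
  generalize (none : Option α) = acc
  induction l generalizing acc with
  | nil => rfl
  | cons x xs ih =>
    simp only [List.foldl_cons]
    cases acc with
    | none => exact ih (some x)
    | some m =>
      show List.foldl _ (if k₁ x < k₁ m then some x else some m) xs
        = List.foldl _ (if k₂ x < k₂ m then some x else some m) xs
      by_cases hc : k₂ x < k₂ m
      · rw [if_pos ((h x m).mpr hc), if_pos hc]; exact ih _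
      · rw [if_neg (fun hh => hc ((h x m).mp hh)), if_neg hc]; exact ih _

theorem min?_append_singleton {α : Type} (key : α → Nat) (l : List α) (a : α) :
    PySem.List.min? (l ++ [a]) key
      = (match PySem.List.min? l key with
        | none => some a
        | some m => if key a < key m then some a else some m) := by
  cases hz : PySem.List.min? l key with
  | none => simp only [PySem.List.min?] at hz ⊢; rw [List.foldl_append, hz]; rfl
  | some m => simp only [PySem.List.min?] at hz ⊢; rw [List.foldl_append, hz]; rfl

theorem find?_insertBy_neg {α : Type} (before : α → α → Bool) (p : α → Bool) (a : α)
    (h : p a = false) (l : List α) :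
    (PySem.List.insertBy before a l).find? p = l.find? p := by
  induction l with
  | nil => simp [PySem.List.insertBy, h]
  | cons y ys ih =>
    simp only [PySem.List.insertBy]
    split
    · cases hy : p y <;> simp [h, hy]
    · cases hy : p y <;> simp [hy, ih]

theorem find?_insertBy_pos {α : Type} (key : α → Nat) (p : α → Bool) (a : α)
    (hpa : p a = true) (l : List α) (hl : l.Pairwise (fun x y => key x ≤ key y)) :
    (PySem.List.insertBy (fun x y => decide (key x < key y)) a l).find? p
      = (match l.find? p with
        | none => some a
        | some m => if key a < key m then some a else some m) := by
  induction l with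
  | nil => simp [PySem.List.insertBy, hpa]
  | cons y ys ih =>
    have hy₁ : ∀ z ∈ ys, key y ≤ key z := (List.pairwise_cons.mp hl).1
    have hys : ys.Pairwise (fun x y => key x ≤ key y) := (List.pairwise_cons.mp hl).2
    simp only [PySem.List.insertBy]
    split
    · rename_i hb
      have hb' : key a < key y := of_decide_eq_true hb
      cases hfy : (y :: ys).find? p with
      | none => simp [hpa]
      | some m =>
        have hm : m ∈ y :: ys := List.mem_of_find?_eq_some hfy
        have : key y ≤ key m := by
          rcases List.mem_cons.mp hm with h | h
          · subst h; exact le_refl _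
          · exact hy₁ m h
        simp [hpa, Nat.lt_of_lt_of_le hb' this]
    · rename_i hb
      have hb' : ¬ key a < key y := of_decide_eq_false (by simpa using hb)
      cases hy : p y with
      | true => simp [hy, hb']
      | false => simpa [List.find?_cons, hy] using ih hys

theorem find?_sorted_eq_min?_filter {α : Type} (key : α → Nat) (p : α → Bool) (xs : List α) :
    (PySem.List.sorted xs key false).find? p = PySem.List.min? (xs.filter p) key := by
  induction xs using List.reverseRecOn with
  | nil => rfl
  | append_singleton xs a ih =>
    have hs : PySem.List.sorted (xs ++ [a]) key false
        = PySem.List.insertBy (fun x y => decide (key x < key y)) a (PySem.List.sorted xs key false) := by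
      simp [PySem.List.sorted, List.foldl_append]
    rw [hs, List.filter_append]
    cases hpa : p a with
    | false =>
      rw [find?_insertBy_neg _ p a hpa, ih]
      simp [hpa]
    | true =>
      rw [find?_insertBy_pos key p a hpa _ (PySem.List.sorted_pairwise xs key), ih]
      simp only [List.filter_cons, hpa, if_true, List.filter_nil]
      rw [min?_append_singleton]

-- the per-group answer of A equals the per-group answer of B
theorem ans_eq (d : PySem.Dict String (List (String × List String))) (groups : List String) (g : String) :
    (match PySem.List.min?
        (groups.foldl (fun candidates other =>
          if other == g then candidates
          else
            if pvSub (pvObjs d g) (pvObjs d other) && !(pvSetEq (pvObjs d g) (pvObjs d other)) then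
              candidates ++ [(other, (pvSetLen (pvObjs d other) : Int) - (pvSetLen (pvObjs d g) : Int))]
            else candidates) ([] : List (String × Int)))
        (fun x => x.2) with
      | none => (none : Option String)
      | some m => some m.1)
    = (PySem.List.sorted groups (fun h => pvSetLen (pvObjs d h)) false).find?
        (fun other => pvProperSub (pvObjs d g) (pvObjs d other)) := by
  rw [PySem.List.foldl_congr_mem groups _
    (fun candidates other =>
      if (!(other == g) && (pvSub (pvObjs d g) (pvObjs d other) && !(pvSetEq (pvObjs d g) (pvObjs d other)))) then
        candidates ++ [(other, (pvSetLen (pvObjs d other) : Int) - (pvSetLen (pvObjs d g) : Int))]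
      else candidates) _
    (by
      intro acc x _
      by_cases h : x = g
      · simp [h]
      · have hb : (x == g) = false := beq_eq_false_iff_ne.mpr h
        simp [hb])]
  rw [PySem.List.foldl_append_if _ _ groups]
  rw [List.filter_congr (fun o _ => pred_eq d g o), List.nil_append]
  rw [min?_map (fun o => (o, (pvSetLen (pvObjs d o) : Int) - (pvSetLen (pvObjs d g) : Int))) (fun x => x.2)]
  rw [min?_congr (fun o => (pvSetLen (pvObjs d o) : Int) - (pvSetLen (pvObjs d g) : Int))
    (fun o => pvSetLen (pvObjs d o))
    (by intro x y; dsimp only; omega)]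
  rw [find?_sorted_eq_min?_filter]
  cases PySem.List.min? (groups.filter fun o => pvProperSub (pvObjs d g) (pvObjs d o))
      (fun o => pvSetLen (pvObjs d o)) <;> simp

-- per-iteration step of A equals the per-iteration step of B
theorem step_eq (d : PySem.Dict String (List (String × List String))) (groups : List String)
    (acc : PySem.Dict String (Option String)) (g : String) :
    (match PySem.List.min?
        (groups.foldl (fun candidates other =>
          if other == g then candidates
          else
            if pvSub (pvObjs d g) (pvObjs d other) && !(pvSetEq (pvObjs d g) (pvObjs d other)) then
              candidates ++ [(other, (pvSetLen (pvObjs d other) : Int) - (pvSetLen (pvObjs d g) : Int))]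
            else candidates) ([] : List (String × Int)))
        (fun x => x.2) with
      | none => acc.insert g none
      | some m => (acc.insert g none).insert g (some m.1))
    = acc.insert g ((PySem.List.sorted groups (fun h => pvSetLen (pvObjs d h)) false).find?
        (fun other => pvProperSub (pvObjs d g) (pvObjs d other))) := by
  have h := ans_eq d groups g
  cases hmin : PySem.List.min?
      (groups.foldl (fun candidates other =>
        if other == g then candidates
        else
          if pvSub (pvObjs d g) (pvObjs d other) && !(pvSetEq (pvObjs d g) (pvObjs d other)) then
            candidates ++ [(other, (pvSetLen (pvObjs d other) : Int) - (pvSetLen (pvObjs d g) : Int))]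
          else candidates) ([] : List (String × Int)))
      (fun x => x.2) with
  | none => rw [hmin] at h; simp only at h; rw [← h]
  | some m =>
    rw [hmin] at h; simp only at h
    show (acc.insert g none).insert g (some m.1) = _
    rw [PySem.Dict.insert_insert_self, ← h]

-- ===== VERDICT (by name: the statement is the Claim_ definition above) =====
theorem infer_group_hierarchy_spec : Claim_equal_infer_group_hierarchy := by
  intro group_dict _ _
  unfold Spec_infer_group_hierarchy infer_group_hierarchy infer_group_hierarchy_alt
  dsimp only
  congr 1
  apply PySem.List.foldl_congr_mem
  intro acc g _
  exact step_eq (PySem.Dict.ofList group_dict) (PySem.Dict.ofList group_dict).keys acc g
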